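-- pv_equiv track=rewrite | github.com/arrowlanguage/arrow | sketches/sketch.py | add_to_env
-- ===== SOURCE A (Python) =====
-- def add_to_env(env_list, var, val):
--     """Return a new environment with var->val appended (or replaced)."""
--     # If var already exists, replace it:
--     new_env = []
--     replaced = False
--     for k, v in env_list:
--         if k == var:
--             new_env.append((k, val))
--             replaced = True
--         else:
--             new_env.append((k, v))
--     if not replaced:
--         new_env.append((var, val))
--     return new_env
-- ===== SOURCE B (Python) =====
-- def add_to_env(env_list, var, val):
--     """Return a new environment with var->val appended (or replaced)."""
--     env_list = list(env_list)
--     if not env_list: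
--         return [(var, val)]
--     (k, v), rest = env_list[0], env_list[1:]
--     if k == var:
--         # found: replace here and in the remainder; nothing to append
--         return [(var, val)] + [(var, val) if rk == var else (rk, rv) for rk, rv in rest]
--     return [(k, v)] + add_to_env(rest, var, val)
-- ===== Notes on version B (the rewrite author's own statement) =====
-- stated objective: alternative
-- what changed: Replaces A's iterative loop that threads a 'replaced' flag and does a post-loop conditional append by a structural recursion that switches mode at the first match: before a match it recurses (the append for the absent case happens at the empty-list base), and at the first match it stops recursing and finishes with a pure replace-map of the tail.
import Mathlib
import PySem

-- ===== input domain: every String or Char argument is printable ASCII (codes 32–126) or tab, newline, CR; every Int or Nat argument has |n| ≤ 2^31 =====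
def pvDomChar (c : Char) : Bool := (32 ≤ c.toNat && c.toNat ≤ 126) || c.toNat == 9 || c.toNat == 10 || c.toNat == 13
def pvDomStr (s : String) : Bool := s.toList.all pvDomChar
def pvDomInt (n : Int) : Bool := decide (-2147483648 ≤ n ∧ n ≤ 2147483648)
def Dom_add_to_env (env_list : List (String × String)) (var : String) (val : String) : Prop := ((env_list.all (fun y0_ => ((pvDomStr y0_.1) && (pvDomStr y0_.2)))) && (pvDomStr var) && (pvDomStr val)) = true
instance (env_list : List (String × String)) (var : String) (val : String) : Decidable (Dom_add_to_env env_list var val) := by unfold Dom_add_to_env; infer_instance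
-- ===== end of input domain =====

-- B replaces A's flag-threading loop with post-loop append by a structural recursion that
-- switches mode at the first matching key (objective: alternative decomposition, same cost).

-- ===== PORT A =====
-- for k, v in env_list: append (k, val) and set replaced when k == var, else append (k, v);
-- afterwards append (var, val) if not replaced.
def add_to_env (env_list : List (String × String)) (var : String) (val : String) : List (String × String) :=
  let st := env_list.foldl
    (fun (st : List (String × String) × Bool) kv =>
      if kv.1 == var then (st.1 ++ [(kv.1, val)], true)
      else (st.1 ++ [kv], st.2))
    ([], false)
  if !st.2 then st.1 ++ [(var, val)] else st.1

-- ===== PORT B =====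
-- recursion: empty -> [(var, val)]; first key matches -> (var, val) :: replace-map of the rest;
-- otherwise keep the head and recurse on the tail.
def add_to_env_alt (env_list : List (String × String)) (var : String) (val : String) : List (String × String) :=
  match env_list with
  | [] => [(var, val)]
  | kv :: rest =>
    if kv.1 == var then
      (var, val) :: rest.map (fun r => if r.1 == var then (var, val) else r)
    else
      kv :: add_to_env_alt rest var val

-- ===== PRECONDITION & SPEC =====
def Spec_add_to_env (env_list : List (String × String)) (var : String) (val : String) (out : List (String × String)) : Prop := out = add_to_env_alt env_list var val
instance (env_list : List (String × String)) (var : String) (val : String) (out : List (String × String)) : Decidable (Spec_add_to_env env_list var val out) := by unfold Spec_add_to_env; infer_instance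

-- ===== CLAIM (what is proved, stated in full; the proofs are below) =====
def Claim_equal_add_to_env : Prop := ∀ (env_list : List (String × String)) (var : String) (val : String), Dom_add_to_env env_list var val → Spec_add_to_env env_list var val (add_to_env env_list var val)

-- ===== LEMMAS AND PROOFS =====

-- A's loop state after processing l, starting from (acc, b): the processed part is the
-- replace-map of l appended to acc; the flag is b ∨ (var occurs as a key in l).
theorem add_to_env_fold_char (var val : String) (l : List (String × String))
    (acc : List (String × String)) (b : Bool) :
    l.foldl
      (fun (st : List (String × String) × Bool) kv =>
        if kv.1 == var then (st.1 ++ [(kv.1, val)], true)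
        else (st.1 ++ [kv], st.2))
      (acc, b)
    = (acc ++ l.map (fun kv => if kv.1 == var then (var, val) else kv),
       b || l.any (fun kv => kv.1 == var)) := by
  induction l generalizing acc b with
  | nil => simp
  | cons kv t ih =>
    by_cases h : kv.1 == var
    · have hk : kv.1 = var := by simpa using h
      simp only [List.foldl_cons, ih, hk, List.any_cons, List.map_cons]
      simp
    · simp only [List.foldl_cons, ih, List.any_cons, List.map_cons]
      have hb : (kv.1 == var) = false := by simpa using h
      simp [hb]

-- B's recursion computes the replace-map when var occurs, and env_list ++ [(var, val)] otherwise.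
theorem add_to_env_alt_char (env_list : List (String × String)) (var val : String) :
    add_to_env_alt env_list var val =
      if env_list.any (fun kv => kv.1 == var) then
        env_list.map (fun kv => if kv.1 == var then (var, val) else kv)
      else env_list ++ [(var, val)] := by
  induction env_list with
  | nil => simp [add_to_env_alt]
  | cons kv t ih =>
    by_cases h : kv.1 == var
    · have hk : kv.1 = var := by simpa using h
      simp [add_to_env_alt, hk]
    · have hb : (kv.1 == var) = false := by simpa using h
      simp only [add_to_env_alt, hb, List.any_cons, List.map_cons, Bool.false_or, ih]
      by_cases ht : t.any (fun kv => kv.1 == var) <;> simp [ht]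

-- ===== VERDICT (by name: the statement is the Claim_ definition above) =====
theorem add_to_env_spec : Claim_equal_add_to_env := by
  intro env_list var val _
  unfold Spec_add_to_env add_to_env
  rw [add_to_env_fold_char, add_to_env_alt_char]
  by_cases h : env_list.any (fun kv => kv.1 == var)
  · simp [h]
  · have hb : (env_list.any fun kv => kv.1 == var) = false := Bool.eq_false_iff.mpr h
    have hmap : env_list.map (fun kv => if kv.1 == var then (var, val) else kv) = env_list := by
      conv_rhs => rw [← List.map_id env_list]
      apply List.map_congr_left
      intro kv hkv
      have hk : (kv.1 == var) = false := by
        by_contra hc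
        have hany : (env_list.any fun kv => kv.1 == var) = true :=
          List.any_eq_true.mpr ⟨kv, hkv, by simpa using hc⟩
        simp [hany] at hb
      simp [hk]
    simp only [hb, Bool.false_or, Bool.not_false, if_true, hmap]
    simp
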